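-- pv_equiv track=rewrite | github.com/tbilloud/gate-pixel | tools/utils_opengate.py | format_activity_int
-- ===== SOURCE A (Python) =====
-- def format_activity_int(activity_bq):
--     units = [("Bq", 1), ("kBq", 1_000), ("MBq", 1_000_000), ("GBq", 1_000_000_000)]
--     value = activity_bq
--     for i in range(len(units)-1, -1, -1):
--         unit, factor = units[i]
--         if value % factor == 0:
--             return f"{int(value // factor)}{unit}"
--     return f"{int(value)}Bq"
-- ===== SOURCE B (Python) =====
-- def format_activity_int(activity_bq):
--     units = ["Bq", "kBq", "MBq", "GBq"]
--     value = activity_bq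
--     count = 0
--     while count < 3 and value % 1000 == 0:
--         value //= 1000
--         count += 1
--     return f"{int(value)}{units[count]}"
-- ===== Notes on version B (the rewrite author's own statement) =====
-- stated objective: simpler
-- what changed: Replaced the largest-to-smallest scan of a precomputed (unit, factor) table by a loop that repeatedly divides by 1000 (capped at 3 times) while the value is divisible, counting the divisions to pick the unit.
import Mathlib
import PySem

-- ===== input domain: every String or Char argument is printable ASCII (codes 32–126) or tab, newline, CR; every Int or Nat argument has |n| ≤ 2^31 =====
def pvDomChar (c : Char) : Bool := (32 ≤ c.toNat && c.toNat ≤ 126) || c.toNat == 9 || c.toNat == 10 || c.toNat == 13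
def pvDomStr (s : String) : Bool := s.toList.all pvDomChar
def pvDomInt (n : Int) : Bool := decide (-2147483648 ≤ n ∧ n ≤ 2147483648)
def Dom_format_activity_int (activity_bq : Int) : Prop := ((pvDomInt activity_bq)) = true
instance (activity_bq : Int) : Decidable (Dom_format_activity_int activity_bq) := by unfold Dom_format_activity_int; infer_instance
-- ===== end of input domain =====

-- B replaces A's largest-to-smallest scan of a (unit, factor) table with a repeated
-- division-by-1000 counting loop (objective: simpler); same return value for every int input.

-- ===== PORT A =====
def pvAUnits : List (String × Int) :=
  [("Bq", 1), ("kBq", 1000), ("MBq", 1000000), ("GBq", 1000000000)]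

-- the for-loop over range(len(units)-1, -1, -1) with its early return; the `none`
-- branch of the index lookup is unreachable (every generated index is in range)
def pvALoop (value : Int) : List Int → String
  | [] => PySem.Int.toStr value ++ "Bq"
  | i :: rest =>
    match PySem.List.pyGet? pvAUnits i with
    | some (unit, factor) =>
      if PySem.Int.mod value factor = 0 then
        PySem.Int.toStr (PySem.Int.floordiv value factor) ++ unit
      else pvALoop value rest
    | none => pvALoop value rest

def format_activity_int (activity_bq : Int) : String :=
  pvALoop activity_bq (PySem.List.pyRange ((pvAUnits.length : Int) - 1) (-1) (-1))

-- ===== PORT B =====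
-- while count < 3 and value % 1000 == 0: value //= 1000; count += 1
def pvBLoop (value : Int) (count : Nat) : Int × Nat :=
  if count < 3 ∧ PySem.Int.mod value 1000 = 0 then
    pvBLoop (PySem.Int.floordiv value 1000) (count + 1)
  else (value, count)
termination_by 3 - count

def format_activity_int_alt (activity_bq : Int) : String :=
  let units : List String := ["Bq", "kBq", "MBq", "GBq"]
  let p := pvBLoop activity_bq 0
  PySem.Int.toStr p.1 ++ (PySem.List.pyGet? units (p.2 : Int)).getD ""

-- ===== PRECONDITION & SPEC =====
def Spec_format_activity_int (activity_bq : Int) (out : String) : Prop := out = format_activity_int_alt activity_bq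
instance (activity_bq : Int) (out : String) : Decidable (Spec_format_activity_int activity_bq out) := by unfold Spec_format_activity_int; infer_instance

-- ===== CLAIM (what is proved, stated in full; the proofs are below) =====
def Claim_equal_format_activity_int : Prop := ∀ (activity_bq : Int), Dom_format_activity_int activity_bq → Spec_format_activity_int activity_bq (format_activity_int activity_bq)

-- ===== LEMMAS AND PROOFS =====

lemma pv_fdiv_cancel (x : Int) : PySem.Int.floordiv (1000 * x) 1000 = x := by
  rw [PySem.Int.floordiv_eq_ediv_of_pos (by norm_num)]
  exact Int.mul_ediv_cancel_left x (by norm_num)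

lemma pv_mod_mul (x : Int) : PySem.Int.mod (1000 * x) 1000 = 0 := by
  rw [PySem.Int.mod_eq_zero_iff_dvd]; exact Dvd.intro x rfl

-- A's scan written as a nested-if characterisation
lemma A_char (v : Int) : format_activity_int v =
    if PySem.Int.mod v 1000000000 = 0 then
      PySem.Int.toStr (PySem.Int.floordiv v 1000000000) ++ "GBq"
    else if PySem.Int.mod v 1000000 = 0 then
      PySem.Int.toStr (PySem.Int.floordiv v 1000000) ++ "MBq"
    else if PySem.Int.mod v 1000 = 0 then
      PySem.Int.toStr (PySem.Int.floordiv v 1000) ++ "kBq"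
    else PySem.Int.toStr v ++ "Bq" := by
  have hr : PySem.List.pyRange ((pvAUnits.length : Int) - 1) (-1) (-1) = [3, 2, 1, 0] := by decide
  have h1 : PySem.Int.mod v 1 = 0 := by
    rw [PySem.Int.mod_eq_zero_iff_dvd]; exact one_dvd v
  have hd1 : PySem.Int.floordiv v 1 = v := by
    rw [PySem.Int.floordiv_eq_ediv_of_pos (by norm_num)]; exact Int.ediv_one v
  rw [format_activity_int, hr]
  simp only [pvALoop, pvAUnits, PySem.List.pyGet?, PySem.List.pyIdx?]
  norm_num [h1, hd1, Int.toNat]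

theorem format_activity_int_spec : Claim_equal_format_activity_int := by
  intro v _
  show format_activity_int v = format_activity_int_alt v
  rw [A_char]
  by_cases h1 : (1000 : Int) ∣ v
  · obtain ⟨k, rfl⟩ := h1
    by_cases h2 : (1000 : Int) ∣ k
    · obtain ⟨m, rfl⟩ := h2
      by_cases h3 : (1000 : Int) ∣ m
      · obtain ⟨j, rfl⟩ := h3
        have e9 : PySem.Int.mod (1000 * (1000 * (1000 * j))) 1000000000 = 0 := by
          rw [PySem.Int.mod_eq_zero_iff_dvd]; exact ⟨j, by ring⟩
        have d9 : PySem.Int.floordiv (1000 * (1000 * (1000 * j))) 1000000000 = j := by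
          rw [PySem.Int.floordiv_eq_ediv_of_pos (by norm_num), show (1000 : Int) * (1000 * (1000 * j)) = 1000000000 * j by ring]
          exact Int.mul_ediv_cancel_left j (by norm_num)
        rw [if_pos e9, d9, format_activity_int_alt]
        rw [pvBLoop]
        rw [if_pos ⟨by norm_num, pv_mod_mul _⟩, pv_fdiv_cancel]
        rw [pvBLoop]
        rw [if_pos ⟨by norm_num, pv_mod_mul _⟩, pv_fdiv_cancel]
        rw [pvBLoop]
        rw [if_pos ⟨by norm_num, pv_mod_mul _⟩, pv_fdiv_cancel]
        rw [pvBLoop, if_neg (by simp)]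
        rfl
      · have n9 : ¬ PySem.Int.mod (1000 * (1000 * m)) 1000000000 = 0 := by
          rw [PySem.Int.mod_eq_zero_iff_dvd]; rintro ⟨j, hj⟩; exact h3 ⟨j, by omega⟩
        have e6 : PySem.Int.mod (1000 * (1000 * m)) 1000000 = 0 := by
          rw [PySem.Int.mod_eq_zero_iff_dvd]; exact ⟨m, by ring⟩
        have d6 : PySem.Int.floordiv (1000 * (1000 * m)) 1000000 = m := by
          rw [PySem.Int.floordiv_eq_ediv_of_pos (by norm_num), show (1000 : Int) * (1000 * m) = 1000000 * m by ring]
          exact Int.mul_ediv_cancel_left m (by norm_num)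
        rw [if_neg n9, if_pos e6, d6, format_activity_int_alt]
        rw [pvBLoop]
        rw [if_pos ⟨by norm_num, pv_mod_mul _⟩, pv_fdiv_cancel]
        rw [pvBLoop]
        rw [if_pos ⟨by norm_num, pv_mod_mul _⟩, pv_fdiv_cancel]
        rw [pvBLoop]
        rw [if_neg (by rw [PySem.Int.mod_eq_zero_iff_dvd]; exact fun h => h3 h.2)]
        rfl
    · have n9 : ¬ PySem.Int.mod (1000 * k) 1000000000 = 0 := by
        rw [PySem.Int.mod_eq_zero_iff_dvd]; rintro ⟨j, hj⟩; exact h2 ⟨1000 * j, by omega⟩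
      have n6 : ¬ PySem.Int.mod (1000 * k) 1000000 = 0 := by
        rw [PySem.Int.mod_eq_zero_iff_dvd]; rintro ⟨j, hj⟩; exact h2 ⟨j, by omega⟩
      rw [if_neg n9, if_neg n6, if_pos (pv_mod_mul k), pv_fdiv_cancel, format_activity_int_alt]
      rw [pvBLoop]
      rw [if_pos ⟨by norm_num, pv_mod_mul _⟩, pv_fdiv_cancel]
      rw [pvBLoop]
      rw [if_neg (by rw [PySem.Int.mod_eq_zero_iff_dvd]; exact fun h => h2 h.2)]
      rfl
  · have n3 : ¬ PySem.Int.mod v 1000 = 0 := by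
      rw [PySem.Int.mod_eq_zero_iff_dvd]; exact h1
    have n9 : ¬ PySem.Int.mod v 1000000000 = 0 := by
      rw [PySem.Int.mod_eq_zero_iff_dvd]; rintro ⟨j, rfl⟩; exact h1 ⟨1000000 * j, by ring⟩
    have n6 : ¬ PySem.Int.mod v 1000000 = 0 := by
      rw [PySem.Int.mod_eq_zero_iff_dvd]; rintro ⟨j, rfl⟩; exact h1 ⟨1000 * j, by ring⟩
    rw [if_neg n9, if_neg n6, if_neg n3, format_activity_int_alt]
    rw [pvBLoop, if_neg (by exact fun h => n3 h.2)]
    rfl
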